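-- pv_equiv track=rewrite | github.com/dshemetov/leetcode | python/problems.py | p1306
-- ===== SOURCE A (Python) =====
-- def p1306(arr: list[int], start: int) -> bool:
--     """
--     1306. Jump Game III https://leetcode.com/problems/jump-game-iii/
--
--     Just a BFS.
--
--     Examples:
--     >>> p1306([4,2,3,0,3,1,2], 5)
--     True
--     >>> p1306([4,2,3,0,3,1,2], 0)
--     True
--     >>> p1306([3,0,2,1,2], 2)
--     False
--     """
--     seen = set()
--     stack = {start}
--     while stack:
--         ix = stack.pop()
--
--         if arr[ix] == 0:
--             return True
--
--         seen.add(ix)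
--
--         for ix_ in [ix + arr[ix], ix - arr[ix]]:
--             if 0 <= ix_ < len(arr) and ix_ not in seen:
--                 stack.add(ix_)
--
--     return False
-- ===== SOURCE B (Python) =====
-- def p1306(arr: list[int], start: int) -> bool:
--     # Alternative strategy: saturate the full set of indices reachable from
--     # `start` (expanding only cells whose value is nonzero), then scan the
--     # closure for a zero cell -- no worklist, no early exit.
--     n = len(arr)
--     reach = {start}
--     while True:
--         new = {j for i in reach if arr[i] != 0
--                  for j in (i + arr[i], i - arr[i]) if 0 <= j < n} - reach
--         if not new:
--             break
--         reach |= new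
--     return any(arr[i] == 0 for i in reach)
-- ===== Notes on version B (the rewrite author's own statement) =====
-- stated objective: alternative
-- what changed: A is an early-exit BFS worklist (pop an index, return True the moment a zero cell is popped, push unseen neighbours); B instead saturates the full set of indices reachable from start by round-based fixpoint iteration and only then scans that closure for a zero cell.
import Mathlib
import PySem

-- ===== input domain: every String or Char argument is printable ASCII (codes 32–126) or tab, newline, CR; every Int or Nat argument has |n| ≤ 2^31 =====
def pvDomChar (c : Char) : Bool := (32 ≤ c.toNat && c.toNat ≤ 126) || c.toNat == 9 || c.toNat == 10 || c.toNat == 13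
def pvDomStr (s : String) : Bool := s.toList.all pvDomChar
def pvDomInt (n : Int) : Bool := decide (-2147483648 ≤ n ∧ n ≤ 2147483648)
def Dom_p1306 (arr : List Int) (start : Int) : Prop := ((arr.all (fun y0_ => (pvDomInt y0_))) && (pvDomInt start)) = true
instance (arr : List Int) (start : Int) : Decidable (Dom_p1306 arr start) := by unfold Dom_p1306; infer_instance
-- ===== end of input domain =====

-- B replaces A's early-exit BFS worklist by full reachable-set saturation followed by a
-- scan for a zero cell (objective: alternative decomposition, not faster).
-- A pops from a Python set (hash order); its Bool result is order-independent, which the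
-- equivalence proof below establishes; the port pops the first element of the PySem.Set.

-- ===== PORT A =====
-- `if 0 <= ix_ < len(arr) and ix_ not in seen: stack.add(ix_)` (one turn of the for-loop)
def addIf (s : List Int) (c : Prop) [Decidable c] (j : Int) : List Int :=
  if c then PySem.Set.add s j else s

-- the body of A's while loop; `fuel` only makes the recursion total (each iteration moves
-- one fresh index into `seen`, so within Pre_ the fuel 2*len+2 is never exhausted)
def p1306Loop (arr : List Int) (seen stack : PySem.Set Int) : Nat → Bool
  | 0 => false
  | fuel+1 =>
    match stack with
    | [] => false                              -- while-loop exit: return False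
    | ix :: rest =>                            -- ix = stack.pop()
      match PySem.List.pyGet? arr ix with
      | none => false                          -- IndexError in Python (excluded by Pre_)
      | some v =>
        if v = 0 then true                     -- if arr[ix] == 0: return True
        else
          -- seen.add(ix), then the for-loop over [ix + arr[ix], ix - arr[ix]]
          p1306Loop arr (PySem.Set.add seen ix)
            (addIf (addIf rest
                (0 ≤ ix + v ∧ ix + v < (arr.length : Int) ∧ ix + v ∉ PySem.Set.add seen ix) (ix + v))
              (0 ≤ ix - v ∧ ix - v < (arr.length : Int) ∧ ix - v ∉ PySem.Set.add seen ix) (ix - v))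
            fuel

def p1306 (arr : List Int) (start : Int) : Bool :=
  p1306Loop arr PySem.Set.empty (PySem.Set.ofList [start]) (2 * arr.length + 2)

-- ===== PORT B =====
-- contribution of one i ∈ reach to the comprehension {j for i in reach if arr[i] != 0
--   for j in (i+arr[i], i-arr[i]) if 0 <= j < n} - reach
def p1306NewStep (arr : List Int) (reach acc : PySem.Set Int) (i : Int) : PySem.Set Int :=
  match PySem.List.pyGet? arr i with
  | none => acc                                -- IndexError in Python (excluded by Pre_)
  | some v =>
    if v = 0 then acc
    else
      addIf (addIf acc (0 ≤ i + v ∧ i + v < (arr.length : Int) ∧ i + v ∉ reach) (i + v))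
        (0 ≤ i - v ∧ i - v < (arr.length : Int) ∧ i - v ∉ reach) (i - v)

-- one round: new = {…} - reach
def p1306New (arr : List Int) (reach : PySem.Set Int) : PySem.Set Int :=
  reach.foldl (p1306NewStep arr reach) PySem.Set.empty

-- the while True loop; fuel only makes it total (each non-break round grows `reach`, so
-- within Pre_ the fuel len+2 is never exhausted before the break)
def p1306Grow (arr : List Int) (reach : PySem.Set Int) : Nat → PySem.Set Int
  | 0 => reach
  | fuel+1 =>
    let nw := p1306New arr reach
    if nw = [] then reach                      -- if not new: break
    else p1306Grow arr (PySem.Set.union reach nw) fuel   -- reach |= new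

def p1306_alt (arr : List Int) (start : Int) : Bool :=
  (p1306Grow arr (PySem.Set.ofList [start]) (arr.length + 2)).any
    (fun i => PySem.List.pyGet? arr i == some 0)   -- any(arr[i] == 0 for i in reach)

-- ===== PRECONDITION & SPEC =====
-- Pre_ excludes exactly the inputs where Python A raises IndexError: a start index out of
-- range of arr (including the empty arr), on which B raises the same IndexError.
def Pre_p1306 (arr : List Int) (start : Int) : Prop :=
  -(arr.length : Int) ≤ start ∧ start < (arr.length : Int)
instance (arr : List Int) (start : Int) : Decidable (Pre_p1306 arr start) := by unfold Pre_p1306; infer_instance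
def pvWitness_p1306 : List Int × Int := ([4, 2, 3, 0, 3, 1, 2], 5)

def Spec_p1306 (arr : List Int) (start : Int) (out : Bool) : Prop := out = p1306_alt arr start
instance (arr : List Int) (start : Int) (out : Bool) : Decidable (Spec_p1306 arr start out) := by unfold Spec_p1306; infer_instance

-- ===== CLAIM (what is proved, stated in full; the proofs are below) =====
def Claim_equal_p1306 : Prop := ∀ (arr : List Int) (start : Int), Dom_p1306 arr start → Pre_p1306 arr start → Spec_p1306 arr start (p1306 arr start)

-- ===== LEMMAS AND PROOFS =====

-- `Hits arr i`: from index i a zero cell is reachable by valid jumps through nonzero cells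
inductive Hits (arr : List Int) : Int → Prop
  | zero (i : Int) : PySem.List.pyGet? arr i = some 0 → Hits arr i
  | step (i j v : Int) : PySem.List.pyGet? arr i = some v → v ≠ 0 →
      (j = i + v ∨ j = i - v) → 0 ≤ j → j < (arr.length : Int) → Hits arr j → Hits arr i

-- `PathR arr start i`: index i is reachable from start by valid jumps through nonzero cells
inductive PathR (arr : List Int) (start : Int) : Int → Prop
  | refl : PathR arr start start
  | step (i j v : Int) : PathR arr start i → PySem.List.pyGet? arr i = some v → v ≠ 0 →
      (j = i + v ∨ j = i - v) → 0 ≤ j → j < (arr.length : Int) → PathR arr start j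

def InV (arr : List Int) (x : Int) : Prop := -(arr.length : Int) ≤ x ∧ x < (arr.length : Int)

lemma pyGet?_isSome_of_InV (arr : List Int) (x : Int) (h : InV arr x) :
    ∃ v, PySem.List.pyGet? arr x = some v := by
  unfold InV at h
  rcases hn : PySem.List.pyGet? arr x with _ | v
  · rw [PySem.List.pyGet?_eq_none_iff] at hn
    exact absurd (by unfold PySem.Raise.InRange; omega : PySem.Raise.InRange arr.length x) hn
  · exact ⟨v, rfl⟩

-- A's loop invariant
def InvA (arr : List Int) (seen stack : List Int) : Prop :=
  seen.Nodup ∧ stack.Nodup ∧ (∀ x ∈ stack, x ∉ seen) ∧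
  (∀ x ∈ seen, InV arr x) ∧ (∀ x ∈ stack, InV arr x) ∧
  (∀ x ∈ seen, ∃ v, PySem.List.pyGet? arr x = some v ∧ v ≠ 0 ∧
    ∀ j, (j = x + v ∨ j = x - v) → 0 ≤ j → j < (arr.length : Int) → (j ∈ seen ∨ j ∈ stack))

-- a hit inside seen ∪ stack always yields a hit inside stack
lemma escape (arr : List Int) (seen stack : List Int) (hInv : InvA arr seen stack) :
    ∀ x, Hits arr x → (x ∈ seen ∨ x ∈ stack) → ∃ y ∈ stack, Hits arr y := by
  intro x hx
  induction hx with
  | zero i h0 =>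
    rintro (hs | hs)
    · obtain ⟨v, hv, hv0, _⟩ := hInv.2.2.2.2.2 i hs
      rw [h0] at hv; cases hv; exact absurd rfl hv0
    · exact ⟨i, hs, Hits.zero i h0⟩
  | step i j v hv hv0 hj h0 hlen hhit ih =>
    rintro (hs | hs)
    · obtain ⟨v', hv', hv'0, hnb⟩ := hInv.2.2.2.2.2 i hs
      rw [hv] at hv'; cases hv'
      exact ih (hnb j hj h0 hlen)
    · exact ⟨i, hs, Hits.step i j v hv hv0 hj h0 hlen hhit⟩

lemma mem_addIf (s : List Int) (c : Prop) [Decidable c] (j y : Int) :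
    y ∈ addIf s c j ↔ y ∈ s ∨ (c ∧ y = j) := by
  unfold addIf; split_ifs with h
  · rw [PySem.Set.mem_add]; tauto
  · tauto

lemma nodup_addIf (s : List Int) (c : Prop) [Decidable c] (j : Int) (h : s.Nodup) :
    (addIf s c j).Nodup := by
  unfold addIf; split_ifs
  · exact PySem.Set.nodup_add _ _ h
  · exact h

lemma length_lt_of_fresh (arr : List Int) (seen : List Int) (ix : Int)
    (hnd : seen.Nodup) (hsub : ∀ x ∈ seen, InV arr x) (hix : InV arr ix) (hfresh : ix ∉ seen) :
    seen.length < 2 * arr.length := by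
  have hnd2 : (ix :: seen).Nodup := List.nodup_cons.mpr ⟨hfresh, hnd⟩
  have hsubF : (ix :: seen).toFinset ⊆ Finset.Ico (-(arr.length:Int)) (arr.length:Int) := by
    intro x hx
    rw [List.mem_toFinset] at hx
    rcases hx with _ | hx
    · exact Finset.mem_Ico.mpr hix
    · exact Finset.mem_Ico.mpr (hsub x (by assumption))
  have hcard := Finset.card_le_card hsubF
  rw [List.toFinset_card_of_nodup hnd2] at hcard
  have : (Finset.Ico (-(arr.length:Int)) (arr.length:Int)).card
      = ((arr.length:Int) - (-(arr.length:Int))).toNat := Int.card_Ico _ _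
  simp only [List.length_cons] at hcard
  omega

-- main characterisation of A's loop
lemma loopA_iff (arr : List Int) : ∀ (fuel : Nat) (seen stack : List Int),
    InvA arr seen stack → 2 * arr.length - seen.length + 1 ≤ fuel →
    (p1306Loop arr seen stack fuel = true ↔ ∃ x ∈ stack, Hits arr x) := by
  intro fuel
  induction fuel with
  | zero => intro seen stack _ hf; omega
  | succ fuel ih =>
    rintro seen (_ | ⟨ix, rest⟩) hInv hf
    · simp [p1306Loop]
    obtain ⟨hndS, hndT, hdisj, hseenV, hstackV, hcov⟩ := hInv
    obtain ⟨v, hv⟩ := pyGet?_isSome_of_InV arr ix (hstackV ix (by simp))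
    by_cases hv0 : v = 0
    · subst hv0
      simp only [p1306Loop, hv]
      constructor
      · intro _; exact ⟨ix, by simp, Hits.zero ix hv⟩
      · intro _; rfl
    · have hixS : ix ∉ seen := hdisj ix (by simp)
      have hloop : p1306Loop arr seen (ix :: rest) (fuel + 1)
          = p1306Loop arr (PySem.Set.add seen ix)
              (addIf (addIf rest
                  (0 ≤ ix + v ∧ ix + v < (arr.length : Int) ∧ ix + v ∉ PySem.Set.add seen ix) (ix + v))
                (0 ≤ ix - v ∧ ix - v < (arr.length : Int) ∧ ix - v ∉ PySem.Set.add seen ix) (ix - v))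
              fuel := by
        conv_lhs => rw [p1306Loop]
        rw [hv]
        simp only [if_neg hv0]
      rw [hloop]
      obtain ⟨seen', hseen'⟩ : ∃ s, PySem.Set.add seen ix = s := ⟨_, rfl⟩
      rw [hseen']
      have hseen'eq : seen' = seen ++ [ix] := hseen' ▸ PySem.Set.add_of_not_mem hixS
      have hmemS' : ∀ y, y ∈ seen' ↔ y ∈ seen ∨ y = ix := by
        intro y; rw [hseen'eq]; simp
      obtain ⟨st1, hst1⟩ : ∃ t,
          addIf rest (0 ≤ ix + v ∧ ix + v < (arr.length : Int) ∧ ix + v ∉ seen') (ix + v) = t :=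
        ⟨_, rfl⟩
      rw [hst1]
      obtain ⟨st2, hst2⟩ : ∃ t,
          addIf st1 (0 ≤ ix - v ∧ ix - v < (arr.length : Int) ∧ ix - v ∉ seen') (ix - v) = t :=
        ⟨_, rfl⟩
      rw [hst2]
      have hmem2 : ∀ y, y ∈ st2 ↔ y ∈ rest ∨
          ((0 ≤ ix + v ∧ ix + v < (arr.length : Int) ∧ ix + v ∉ seen') ∧ y = ix + v) ∨
          ((0 ≤ ix - v ∧ ix - v < (arr.length : Int) ∧ ix - v ∉ seen') ∧ y = ix - v) := by
        intro y; rw [← hst2, mem_addIf, ← hst1, mem_addIf]; tauto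
      have hrestT : rest.Nodup := (List.nodup_cons.mp hndT).2
      have hixR : ix ∉ rest := (List.nodup_cons.mp hndT).1
      have hInv' : InvA arr seen' st2 := by
        refine ⟨?_, ?_, ?_, ?_, ?_, ?_⟩
        · rw [hseen'eq]; exact List.Nodup.append hndS (by simp) (by simpa using fun h => hixS h)
        · rw [← hst2]; exact nodup_addIf _ _ _ (by rw [← hst1]; exact nodup_addIf _ _ _ hrestT)
        · intro x hx
          rcases (hmem2 x).mp hx with hx | ⟨hc, rfl⟩ | ⟨hc, rfl⟩
          · rw [hmemS']
            rintro (h | rfl)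
            · exact hdisj x (by simp [hx]) h
            · exact hixR hx
          · exact hc.2.2
          · exact hc.2.2
        · intro x hx
          rcases (hmemS' x).mp hx with hx | rfl
          · exact hseenV x hx
          · exact hstackV x (by simp)
        · intro x hx
          rcases (hmem2 x).mp hx with hx | ⟨hc, rfl⟩ | ⟨hc, rfl⟩
          · exact hstackV x (by simp [hx])
          · exact ⟨by have := hc.1; omega, hc.2.1⟩
          · exact ⟨by have := hc.1; omega, hc.2.1⟩
        · intro x hx
          rcases (hmemS' x).mp hx with hx | rfl
          · obtain ⟨v', hv', hv'0, hnb⟩ := hcov x hx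
            refine ⟨v', hv', hv'0, fun j hj h0 hlen => ?_⟩
            rcases hnb j hj h0 hlen with h | h
            · exact Or.inl ((hmemS' j).mpr (Or.inl h))
            · rcases List.mem_cons.mp h with rfl | h
              · exact Or.inl ((hmemS' j).mpr (Or.inr rfl))
              · exact Or.inr ((hmem2 j).mpr (Or.inl h))
          · refine ⟨v, hv, hv0, fun j hj h0 hlen => ?_⟩
            by_cases hjS : j ∈ seen'
            · exact Or.inl hjS
            · rcases hj with rfl | rfl
              · exact Or.inr ((hmem2 _).mpr (Or.inr (Or.inl ⟨⟨h0, hlen, hjS⟩, rfl⟩)))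
              · exact Or.inr ((hmem2 _).mpr (Or.inr (Or.inr ⟨⟨h0, hlen, hjS⟩, rfl⟩)))
      have hlen' : seen'.length = seen.length + 1 := by rw [hseen'eq]; simp
      have hlt : seen.length < 2 * arr.length :=
        length_lt_of_fresh arr seen ix hndS hseenV (hstackV ix (by simp)) hixS
      rw [ih seen' st2 hInv' (by omega)]
      constructor
      · rintro ⟨x, hx, hhit⟩
        rcases (hmem2 x).mp hx with hx | ⟨hc, rfl⟩ | ⟨hc, rfl⟩
        · exact ⟨x, by simp [hx], hhit⟩
        · exact ⟨ix, by simp, Hits.step ix (ix + v) v hv hv0 (Or.inl rfl) hc.1 hc.2.1 hhit⟩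
        · exact ⟨ix, by simp, Hits.step ix (ix - v) v hv hv0 (Or.inr rfl) hc.1 hc.2.1 hhit⟩
      · rintro ⟨x, hx, hhit⟩
        rcases List.mem_cons.mp hx with rfl | hx
        · cases hhit with
          | zero _ h0 => rw [hv] at h0; cases h0; exact absurd rfl hv0
          | step _ j v' hv' hv'0 hj h0 hlen hhitj =>
            rw [hv] at hv'; cases hv'
            have hjmem : j ∈ seen' ∨ j ∈ st2 := by
              obtain ⟨w, hw, hw0, hnb⟩ := hInv'.2.2.2.2.2 x ((hmemS' x).mpr (Or.inr rfl))
              rw [hv] at hw; cases hw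
              exact hnb j hj h0 hlen
            exact escape arr seen' st2 hInv' j hhitj hjmem
        · exact ⟨x, (hmem2 x).mpr (Or.inl hx), hhit⟩

-- ===== B side =====

-- what one step of the comprehension fold contributes
def QNew (arr : List Int) (reach : List Int) (i y : Int) : Prop :=
  ∃ v, PySem.List.pyGet? arr i = some v ∧ v ≠ 0 ∧ (y = i + v ∨ y = i - v) ∧
    0 ≤ y ∧ y < (arr.length : Int) ∧ y ∉ reach

lemma mem_newStep (arr : List Int) (reach acc : List Int) (i y : Int) :
    y ∈ p1306NewStep arr reach acc i ↔ y ∈ acc ∨ QNew arr reach i y := by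
  unfold p1306NewStep QNew
  rcases hg : PySem.List.pyGet? arr i with _ | v
  · simp
  · simp only [Option.some.injEq]
    by_cases hv0 : v = 0
    · subst hv0
      constructor
      · exact Or.inl
      · rintro (h | ⟨v', rfl, hv', _⟩)
        · exact h
        · exact absurd rfl hv'
    · rw [if_neg hv0, mem_addIf, mem_addIf]
      constructor
      · rintro ((h | ⟨hc, rfl⟩) | ⟨hc, rfl⟩)
        · exact Or.inl h
        · exact Or.inr ⟨v, rfl, hv0, Or.inl rfl, hc.1, hc.2.1, hc.2.2⟩
        · exact Or.inr ⟨v, rfl, hv0, Or.inr rfl, hc.1, hc.2.1, hc.2.2⟩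
      · rintro (h | ⟨v', rfl, _, (rfl | rfl), h0, hlen, hre⟩)
        · exact Or.inl (Or.inl h)
        · exact Or.inl (Or.inr ⟨⟨h0, hlen, hre⟩, rfl⟩)
        · exact Or.inr ⟨⟨h0, hlen, hre⟩, rfl⟩

lemma mem_new_fold (arr : List Int) (reach : List Int) :
    ∀ (l acc : List Int) (y : Int),
    y ∈ l.foldl (p1306NewStep arr reach) acc ↔ y ∈ acc ∨ ∃ i ∈ l, QNew arr reach i y := by
  intro l
  induction l with
  | nil => simp
  | cons i t ih =>
    intro acc y
    rw [List.foldl_cons, ih, mem_newStep]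
    simp only [List.mem_cons]
    constructor
    · rintro ((h | h) | ⟨i', hi', h⟩)
      · exact Or.inl h
      · exact Or.inr ⟨i, Or.inl rfl, h⟩
      · exact Or.inr ⟨i', Or.inr hi', h⟩
    · rintro (h | ⟨i', (rfl | hi'), h⟩)
      · exact Or.inl (Or.inl h)
      · exact Or.inl (Or.inr h)
      · exact Or.inr ⟨i', hi', h⟩

-- membership in one round's new set
lemma mem_new (arr : List Int) (reach : List Int) (y : Int) :
    y ∈ p1306New arr reach ↔ ∃ i ∈ reach, QNew arr reach i y := by
  unfold p1306New
  rw [mem_new_fold]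
  simp [PySem.Set.empty]

def ClosedB (arr : List Int) (R : List Int) : Prop :=
  ∀ i ∈ R, ∀ v, PySem.List.pyGet? arr i = some v → v ≠ 0 →
    ∀ j, (j = i + v ∨ j = i - v) → 0 ≤ j → j < (arr.length : Int) → j ∈ R

def InVB (arr : List Int) (start : Int) (x : Int) : Prop :=
  x = start ∨ (0 ≤ x ∧ x < (arr.length : Int))

lemma lenVB_le (arr : List Int) (start : Int) (R : List Int) (hnd : R.Nodup)
    (hsub : ∀ x ∈ R, InVB arr start x) : R.length ≤ arr.length + 1 := by
  have hsubF : R.toFinset ⊆ insert start (Finset.Ico (0:Int) (arr.length:Int)) := by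
    intro x hx
    rw [List.mem_toFinset] at hx
    rcases hsub x hx with rfl | hx2
    · exact Finset.mem_insert_self _ _
    · exact Finset.mem_insert_of_mem (Finset.mem_Ico.mpr hx2)
  have hc := Finset.card_le_card hsubF
  rw [List.toFinset_card_of_nodup hnd] at hc
  have h2 := Finset.card_insert_le start (Finset.Ico (0:Int) (arr.length:Int))
  have h3 : (Finset.Ico (0:Int) (arr.length:Int)).card = ((arr.length:Int) - 0).toNat :=
    Int.card_Ico _ _
  omega

lemma grow_subset (arr : List Int) : ∀ (fuel : Nat) (reach : PySem.Set Int) (x : Int),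
    x ∈ reach → x ∈ p1306Grow arr reach fuel := by
  intro fuel
  induction fuel with
  | zero => exact fun reach x hx => hx
  | succ fuel ih =>
    intro reach x hx
    simp only [p1306Grow]
    split_ifs with h
    · exact hx
    · exact ih _ x ((PySem.Set.mem_union _ _ _).mpr (Or.inl hx))

lemma grow_sound (arr : List Int) (start : Int) :
    ∀ (fuel : Nat) (reach : PySem.Set Int),
    (∀ x ∈ reach, PathR arr start x) →
    ∀ x ∈ p1306Grow arr reach fuel, PathR arr start x := by
  intro fuel
  induction fuel with
  | zero => exact fun reach h => h
  | succ fuel ih =>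
    intro reach hre
    simp only [p1306Grow]
    split_ifs with h
    · exact hre
    · refine ih _ fun x hx => ?_
      rcases (PySem.Set.mem_union _ _ _).mp hx with hx | hx
      · exact hre x hx
      · obtain ⟨i, hi, v, hv, hv0, hj, h0, hlen, _⟩ := (mem_new arr reach x).mp hx
        exact PathR.step i x v (hre i hi) hv hv0 hj h0 hlen

lemma grow_closed (arr : List Int) (start : Int) :
    ∀ (fuel : Nat) (reach : PySem.Set Int),
    reach.Nodup → (∀ x ∈ reach, InVB arr start x) →
    arr.length + 1 - reach.length + 1 ≤ fuel →
    ClosedB arr (p1306Grow arr reach fuel) := by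
  intro fuel
  induction fuel with
  | zero => intro reach _ _ hf; omega
  | succ fuel ih =>
    intro reach hnd hsub hf
    simp only [p1306Grow]
    split_ifs with hnw
    · intro i hi v hv hv0 j hj h0 hlen
      by_cases hjr : j ∈ reach
      · exact hjr
      · exact absurd (hnw ▸ (mem_new arr reach j).mpr ⟨i, hi, v, hv, hv0, hj, h0, hlen, hjr⟩)
          List.not_mem_nil
    · have hndU : (PySem.Set.union reach (p1306New arr reach)).Nodup :=
        PySem.Set.nodup_union _ _ hnd
      have hsubU : ∀ x ∈ PySem.Set.union reach (p1306New arr reach), InVB arr start x := by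
        intro x hx
        rcases (PySem.Set.mem_union _ _ _).mp hx with hx | hx
        · exact hsub x hx
        · obtain ⟨i, hi, v, hv, hv0, hj, h0', hlen, _⟩ := (mem_new arr reach x).mp hx
          exact Or.inr ⟨h0', hlen⟩
      have hlen : reach.length < (PySem.Set.union reach (p1306New arr reach)).length := by
        obtain ⟨y, hy⟩ := List.exists_mem_of_ne_nil _ hnw
        obtain ⟨_, _, _, _, _, _, _, _, hyr⟩ := (mem_new arr reach y).mp hy
        have hss : reach.toFinset ⊂ (PySem.Set.union reach (p1306New arr reach)).toFinset := by
          constructor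
          · intro x hx
            rw [List.mem_toFinset] at *
            exact (PySem.Set.mem_union _ _ _).mpr (Or.inl hx)
          · intro hcon
            exact hyr (by simpa using hcon (by simp [(PySem.Set.mem_union _ _ _).mpr (Or.inr hy)] :
              y ∈ (PySem.Set.union reach (p1306New arr reach)).toFinset))
        have := Finset.card_lt_card hss
        rw [List.toFinset_card_of_nodup hnd, List.toFinset_card_of_nodup hndU] at this
        exact this
      have hle := lenVB_le arr start _ hndU hsubU
      exact ih _ hndU hsubU (by omega)

lemma closed_complete (arr : List Int) (start : Int) (R : List Int)
    (hcl : ClosedB arr R) (hst : start ∈ R) :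
    ∀ x, PathR arr start x → x ∈ R := by
  intro x hx
  induction hx with
  | refl => exact hst
  | step i j v _ hv hv0 hj h0 hlen ih => exact hcl i ih v hv hv0 j hj h0 hlen

-- Hits at start ↔ some reachable index is a zero cell
lemma hits_iff_path_zero (arr : List Int) (start : Int) :
    Hits arr start ↔ ∃ i, PathR arr start i ∧ PySem.List.pyGet? arr i = some 0 := by
  constructor
  · have key : ∀ x, Hits arr x → PathR arr start x →
        ∃ i, PathR arr start i ∧ PySem.List.pyGet? arr i = some 0 := by
      intro x hx
      induction hx with
      | zero i h0 => exact fun hp => ⟨i, hp, h0⟩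
      | step i j v hv hv0 hj h0 hlen _ ih =>
        exact fun hp => ih (PathR.step i j v hp hv hv0 hj h0 hlen)
    exact fun h => key start h PathR.refl
  · rintro ⟨i, hp, h0⟩
    have key : ∀ x, PathR arr start x → Hits arr x → Hits arr start := by
      intro x hx
      induction hx with
      | refl => exact id
      | step a b v hpa hv hv0 hb h0' hlen ih =>
        exact fun hh => ih (Hits.step a b v hv hv0 hb h0' hlen hh)
    exact key i hp (Hits.zero i h0)

lemma A_iff_hits (arr : List Int) (start : Int) (hpre : Pre_p1306 arr start) :
    (p1306 arr start = true ↔ Hits arr start) := by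
  have hInv : InvA arr [] [start] := by
    refine ⟨List.nodup_nil, List.nodup_singleton _, by simp, by simp, ?_, by simp⟩
    intro x hx
    rcases List.mem_singleton.mp hx with rfl
    exact hpre
  have h := loopA_iff arr (2 * arr.length + 2) [] [start] hInv (by omega)
  unfold p1306
  rw [show PySem.Set.empty = ([] : List Int) from rfl,
    show PySem.Set.ofList [start] = [start] from rfl, h]
  simp

lemma B_iff_hits (arr : List Int) (start : Int) (hpre : Pre_p1306 arr start) :
    (p1306_alt arr start = true ↔ Hits arr start) := by
  unfold p1306_alt
  rw [show PySem.Set.ofList [start] = [start] from rfl]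
  have hstart : start ∈ p1306Grow arr [start] (arr.length + 2) :=
    grow_subset arr _ [start] start (List.mem_singleton.mpr rfl)
  have hsound : ∀ x ∈ p1306Grow arr [start] (arr.length + 2), PathR arr start x := by
    refine grow_sound arr start _ [start] ?_
    intro x hx
    rcases List.mem_singleton.mp hx with rfl
    exact PathR.refl
  have hclosed : ClosedB arr (p1306Grow arr [start] (arr.length + 2)) :=
    grow_closed arr start (arr.length + 2) [start] (List.nodup_singleton _)
      (fun x hx => by rcases List.mem_singleton.mp hx with rfl; exact Or.inl rfl) (by simp)
  rw [List.any_eq_true, hits_iff_path_zero]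
  constructor
  · rintro ⟨i, hi, hb⟩
    exact ⟨i, hsound i hi, by simpa using hb⟩
  · rintro ⟨i, hp, h0⟩
    exact ⟨i, closed_complete arr start _ hclosed hstart i hp, by simp [h0]⟩

-- ===== VERDICT (by name: the statement is the Claim_ definition above) =====
theorem p1306_spec : Claim_equal_p1306 := by
  intro arr start _ hpre
  unfold Spec_p1306
  have h := (A_iff_hits arr start hpre).trans (B_iff_hits arr start hpre).symm
  cases hA : p1306 arr start <;> cases hB : p1306_alt arr start <;>
    simp_all
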